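-- pv_equiv track=rewrite | github.com/timseymore/py-scripts | Scripts/set.py | set_mod_2_3
-- ===== SOURCE A (Python) =====
-- def set_mod_2_3(size):
--     temp = {}
--     index = 0
--     for i in range(1, size + 1):
--         if (i % 2 == 0) or (i % 3 == 0):
--             temp[index] = i
--             index += 1
--     return temp
-- ===== SOURCE B (Python) =====
-- def set_mod_2_3(size):
--     # Generate the two arithmetic progressions directly, merge them as a set
--     # (deduping the multiples of 6), sort, and enumerate for the 0-based keys.
--     values = sorted(set(range(2, size + 1, 2)) | set(range(3, size + 1, 3)))
--     return dict(enumerate(values))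
-- ===== Notes on version B (the rewrite author's own statement) =====
-- stated objective: alternative
-- what changed: Instead of scanning each integer up to size and testing it with modulo, B generates the even and the triple arithmetic progressions directly with stepped ranges, merges them as a set (deduping the common multiples), sorts the union, and enumerates it to assign the sequential keys.
import Mathlib
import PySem

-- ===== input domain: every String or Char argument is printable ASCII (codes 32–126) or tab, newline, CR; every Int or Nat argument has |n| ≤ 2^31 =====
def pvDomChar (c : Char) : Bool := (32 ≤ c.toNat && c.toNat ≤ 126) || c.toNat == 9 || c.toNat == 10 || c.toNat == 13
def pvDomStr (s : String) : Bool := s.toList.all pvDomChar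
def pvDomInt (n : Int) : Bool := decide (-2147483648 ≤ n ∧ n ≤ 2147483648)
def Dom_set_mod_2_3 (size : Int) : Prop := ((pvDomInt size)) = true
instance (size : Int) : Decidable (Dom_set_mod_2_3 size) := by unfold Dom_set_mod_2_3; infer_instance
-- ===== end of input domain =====

-- B replaces the scan-and-test-modulo loop by generating the two arithmetic
-- progressions (multiples of 2 and of 3), merging them as a set, sorting and
-- enumerating — an alternative, generate-and-merge algorithm.


-- ===== PORT A =====
-- for i in range(1, size+1): if i % 2 == 0 or i % 3 == 0: temp[index] = i; index += 1
def set_mod_2_3 (size : Int) : List (Int × Int) :=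
  ((PySem.List.pyRange 1 (size + 1) 1).foldl
    (fun (st : PySem.Dict Int Int × Int) i =>
      if PySem.Int.mod i 2 == 0 || PySem.Int.mod i 3 == 0
      then (st.1.insert st.2 i, st.2 + 1)
      else st)
    (PySem.Dict.empty, 0)).1.items

-- ===== PORT B =====
-- sorted(set(range(2, size+1, 2)) | set(range(3, size+1, 3))); dict(enumerate(values))
def set_mod_2_3_alt (size : Int) : List (Int × Int) :=
  let values : List Int :=
    PySem.List.sorted
      (PySem.Set.union (PySem.Set.ofList (PySem.List.pyRange 2 (size + 1) 2))
                       (PySem.Set.ofList (PySem.List.pyRange 3 (size + 1) 3)))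
      (fun x => x)
  (PySem.Dict.ofList (PySem.List.enumerate values)).items

-- ===== PRECONDITION & SPEC =====
def Spec_set_mod_2_3 (size : Int) (out : List (Int × Int)) : Prop := out = set_mod_2_3_alt size
instance (size : Int) (out : List (Int × Int)) : Decidable (Spec_set_mod_2_3 size out) := by unfold Spec_set_mod_2_3; infer_instance

-- ===== CLAIM (what is proved, stated in full; the proofs are below) =====
def Claim_equal_set_mod_2_3 : Prop := ∀ (size : Int), Dom_set_mod_2_3 size → Spec_set_mod_2_3 size (set_mod_2_3 size)

-- ===== LEMMAS AND PROOFS =====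

-- the predicate of A's filter
def pvP (i : Int) : Bool := PySem.Int.mod i 2 == 0 || PySem.Int.mod i 3 == 0

-- the common canonical value: ascending kept numbers, paired with 0,1,2,…
def pvKept (size : Int) : List Int := (PySem.List.pyRange 1 (size + 1) 1).filter pvP

-- A's loop, generalised: starting from a dict with no key ≥ k, it appends enumerate of the kept elements
theorem pvA_loop (l : List Int) (d : PySem.Dict Int Int) (k : Int)
    (h : ∀ j, k ≤ j → d.contains j = false) :
    (l.foldl
      (fun (st : PySem.Dict Int Int × Int) i =>
        if pvP i then (st.1.insert st.2 i, st.2 + 1) else st)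
      (d, k)).1.items = d.items ++ PySem.List.enumerate (l.filter pvP) k := by
  induction l generalizing d k with
  | nil => simp
  | cons x t ih =>
    by_cases hx : pvP x
    · have hnc : d.contains k = false := h k le_rfl
      have h' : ∀ j, k + 1 ≤ j → (d.insert k x).contains j = false := by
        intro j hj
        rw [PySem.Dict.contains_insert]
        have : (j == k) = false := by simp; omega
        simp [this, h j (by omega)]
      simp only [List.foldl_cons, hx, if_pos, List.filter_cons_of_pos hx]
      rw [ih (d.insert k x) (k + 1) h',
          PySem.Dict.items_insert_of_not_contains d x hnc,
          PySem.List.enumerate_cons]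
      simp
    · rw [List.foldl_cons, if_neg hx, List.filter_cons_of_neg (by simpa using hx)]
      exact ih d k h

-- folding insert over pairs with fresh, pairwise-distinct keys appends them (dict(pairs))
theorem pvInsert_loop (ps : List (Int × Int)) (d : PySem.Dict Int Int)
    (h : ∀ q ∈ ps, d.contains q.1 = false)
    (hnd : List.Pairwise (fun p q => p.1 ≠ q.1) ps) :
    (ps.foldl (fun acc p => acc.insert p.1 p.2) d).items = d.items ++ ps := by
  induction ps generalizing d with
  | nil => simp
  | cons p t ih =>
    have hnc : d.contains p.1 = false := h p (by simp)
    have h' : ∀ q ∈ t, (d.insert p.1 p.2).contains q.1 = false := by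
      intro q hq
      rw [PySem.Dict.contains_insert]
      have h1 : (q.1 == p.1) = false := by
        simp
        exact fun e => (List.pairwise_cons.mp hnd).1 q hq e.symm
      simp [h1, h q (by simp [hq])]
    rw [List.foldl_cons, ih (d.insert p.1 p.2) h' (List.pairwise_cons.mp hnd).2,
        PySem.Dict.items_insert_of_not_contains d p.2 hnc]
    simp

-- the kept list is exactly the sorted union of the two progressions
theorem pvSorted_union_eq (size : Int) :
    PySem.List.sorted
      (PySem.Set.union (PySem.Set.ofList (PySem.List.pyRange 2 (size + 1) 2))
                       (PySem.Set.ofList (PySem.List.pyRange 3 (size + 1) 3)))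
      (fun x => x) = pvKept size := by
  apply PySem.List.sorted_eq_of_perm_of_pairwise_lt
  · -- permutation: both are Nodup with the same membership
    rw [List.perm_ext_iff_of_nodup]
    · intro x
      rw [PySem.Set.mem_union, PySem.Set.mem_ofList, PySem.Set.mem_ofList,
          PySem.List.mem_pyRange_iff_of_pos (by norm_num),
          PySem.List.mem_pyRange_iff_of_pos (by norm_num)]
      unfold pvKept
      rw [List.mem_filter, PySem.List.mem_pyRange_one]
      unfold pvP
      rw [Bool.or_eq_true, beq_iff_eq, beq_iff_eq,
          PySem.Int.mod_eq_zero_iff_dvd, PySem.Int.mod_eq_zero_iff_dvd]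
      omega
    · unfold pvKept
      exact List.Nodup.filter _ (PySem.List.nodup_pyRange_one 1 (size + 1))
    · exact PySem.Set.nodup_union _ _ (PySem.Set.nodup_ofList _)
  · exact List.Pairwise.filter _ (PySem.List.pairwise_lt_pyRange_one 1 (size + 1))

-- ===== VERDICT (by name: the statement is the Claim_ definition above) =====
theorem set_mod_2_3_spec : Claim_equal_set_mod_2_3 := by
  intro size _
  show set_mod_2_3 size = set_mod_2_3_alt size
  have hA : set_mod_2_3 size = PySem.List.enumerate (pvKept size) := by
    show ((PySem.List.pyRange 1 (size + 1) 1).foldl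
      (fun (st : PySem.Dict Int Int × Int) i =>
        if pvP i then (st.1.insert st.2 i, st.2 + 1) else st)
      (PySem.Dict.empty, 0)).1.items = _
    rw [pvA_loop (PySem.List.pyRange 1 (size + 1) 1) PySem.Dict.empty 0
      (fun j _ => PySem.Dict.contains_empty j)]
    simp [PySem.Dict.empty, pvKept]
  have hB : set_mod_2_3_alt size = PySem.List.enumerate (pvKept size) := by
    unfold set_mod_2_3_alt
    rw [pvSorted_union_eq]
    show (PySem.Dict.ofList (PySem.List.enumerate (pvKept size))).items = _
    unfold PySem.Dict.ofList PySem.Dict.update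
    rw [pvInsert_loop (PySem.List.enumerate (pvKept size)) PySem.Dict.empty
      (fun q _ => PySem.Dict.contains_empty q.1)
      ((PySem.List.pairwise_lt_enumerate (pvKept size) 0).imp (fun h => ne_of_lt h))]
    simp [PySem.Dict.empty]
  rw [hA, hB]
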